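-- pv_equiv track=rewrite | github.com/AlbionDraig/rpa-doc-generator | app/parser/project_parser.py | _collect_project_systems
-- ===== SOURCE A (Python) =====
-- def _collect_project_systems(tasks):
--     systems = []
--     seen = set()
--
--     for task in tasks:
--         for system in task.get("systems", []):
--             signature = (system["type"], system["value"])
--             if signature in seen:
--                 continue
--             seen.add(signature)
--             systems.append(system)
--
--     return sorted(systems, key=lambda item: (item["type"], item["value"]))
-- ===== SOURCE B (Python) =====
-- def _collect_project_systems(tasks):
--     all_systems = [system for task in tasks for system in task.get("systems", [])]
--     all_systems.sort(key=lambda s: (s["type"], s["value"]))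
--     result = []
--     prev = None
--     for system in all_systems:
--         sig = (system["type"], system["value"])
--         if sig != prev:
--             result.append(system)
--             prev = sig
--     return result
-- ===== Notes on version B (the rewrite author's own statement) =====
-- stated objective: alternative
-- what changed: Replaces A's seen-set first-occurrence filter followed by a sort with a flatten, one stable sort of all systems by (type, value), then a single adjacent-dedup pass keeping the first of each equal-signature run.
import Mathlib
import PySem

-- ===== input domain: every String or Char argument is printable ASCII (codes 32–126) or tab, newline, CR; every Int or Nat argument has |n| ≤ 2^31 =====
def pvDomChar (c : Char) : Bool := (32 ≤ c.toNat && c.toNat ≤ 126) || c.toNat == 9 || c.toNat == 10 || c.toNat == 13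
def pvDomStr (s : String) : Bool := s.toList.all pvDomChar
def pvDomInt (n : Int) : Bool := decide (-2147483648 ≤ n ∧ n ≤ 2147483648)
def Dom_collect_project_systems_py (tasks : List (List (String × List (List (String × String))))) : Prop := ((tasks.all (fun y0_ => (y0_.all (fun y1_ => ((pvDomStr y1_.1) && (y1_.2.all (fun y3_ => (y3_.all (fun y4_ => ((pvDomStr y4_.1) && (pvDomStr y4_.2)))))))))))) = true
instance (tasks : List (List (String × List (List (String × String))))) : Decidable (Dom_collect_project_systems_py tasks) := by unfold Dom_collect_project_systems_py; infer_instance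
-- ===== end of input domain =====

-- B rewrites A's seen-set pre-filter + sort as: flatten, one stable sort by (type, value),
-- then one adjacent-dedup pass keeping the first of each equal-signature run (objective: alternative).

-- ===== PORT A =====
-- shared helper: the signature (system["type"], system["value"]) both Pythons compute
-- (total via a default; Pre_ below guarantees both keys are present, as Python requires)
def pvSig (s : List (String × String)) : String × String :=
  ((PySem.Dict.mk s).getD "type" "", (PySem.Dict.mk s).getD "value" "")

def collect_project_systems_py (tasks : List (List (String × List (List (String × String))))) : List (List (String × String)) :=
  -- systems = []; seen = set(); for task in tasks: for system in task.get("systems", []): …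
  let st := tasks.foldl (fun st task =>
      ((PySem.Dict.mk task).getD "systems" []).foldl (fun st system =>
        if PySem.Set.contains st.2 (pvSig system) then st
        else (st.1 ++ [system], PySem.Set.add st.2 (pvSig system))) st)
    ([], PySem.Set.empty)
  -- return sorted(systems, key=lambda item: (item["type"], item["value"]))
  PySem.List.sorted2 st.1 (fun item => (pvSig item).1) (fun item => (pvSig item).2)

-- ===== PORT B =====
-- the 'prev'-carrying dedup loop of Source B, as structural recursion on the sorted list
def pvDedupAdj : Option (String × String) → List (List (String × String)) → List (List (String × String))
  | _, [] => []
  | prev, s :: t =>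
      if some (pvSig s) = prev then pvDedupAdj prev t
      else s :: pvDedupAdj (some (pvSig s)) t

def collect_project_systems_py_alt (tasks : List (List (String × List (List (String × String))))) : List (List (String × String)) :=
  -- all_systems = [system for task in tasks for system in task.get("systems", [])]
  let all_systems := tasks.flatMap (fun task => (PySem.Dict.mk task).getD "systems" [])
  -- all_systems.sort(key=lambda s: (s["type"], s["value"]))  (stable)
  let srt := PySem.List.sorted2 all_systems (fun s => (pvSig s).1) (fun s => (pvSig s).2)
  -- result = []; prev = None; for system in srt: if (type,value) != prev: append; prev = sig
  pvDedupAdj none srt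

-- ===== PRECONDITION & SPEC =====
-- Pre_ excludes exactly the inputs on which Python A raises KeyError: a system dict
-- (inside a task's "systems" list) missing the key "type" or "value".
def Pre_collect_project_systems_py (tasks : List (List (String × List (List (String × String))))) : Prop :=
  ∀ task ∈ tasks, ∀ system ∈ (PySem.Dict.mk task).getD "systems" [],
    (PySem.Dict.mk system).contains "type" = true ∧ (PySem.Dict.mk system).contains "value" = true
instance (tasks : List (List (String × List (List (String × String))))) : Decidable (Pre_collect_project_systems_py tasks) := by unfold Pre_collect_project_systems_py; infer_instance

def pvWitness_collect_project_systems_py : (List (List (String × List (List (String × String))))) :=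
  [[("systems", [[("type", "db"), ("value", "pg")], [("type", "db"), ("value", "pg")]])],
   [("systems", [[("type", "api"), ("value", "crm")]])]]

def Spec_collect_project_systems_py (tasks : List (List (String × List (List (String × String))))) (out : List (List (String × String))) : Prop := out = collect_project_systems_py_alt tasks
instance (tasks : List (List (String × List (List (String × String))))) (out : List (List (String × String))) : Decidable (Spec_collect_project_systems_py tasks out) := by unfold Spec_collect_project_systems_py; infer_instance

-- ===== CLAIM (what is proved, stated in full; the proofs are below) =====
def Claim_equal_collect_project_systems_py : Prop := ∀ (tasks : List (List (String × List (List (String × String))))), Dom_collect_project_systems_py tasks → Pre_collect_project_systems_py tasks → Spec_collect_project_systems_py tasks (collect_project_systems_py tasks)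

-- ===== LEMMAS AND PROOFS =====

-- the sort key, packed into the lexicographic linear order on pairs
def pvM (s : List (String × String)) : Lex (String × String) := toLex (pvSig s)
def pvBf (a b : List (String × String)) : Bool := decide (pvM a < pvM b)

-- sorted2's tuple comparison is exactly < in Lex (String × String)
lemma pv_before_eq :
    (fun a b : List (String × String) =>
      decide ((pvSig a).1 < (pvSig b).1) || (!decide ((pvSig b).1 < (pvSig a).1) && decide ((pvSig a).2 < (pvSig b).2)))
    = pvBf := by
  funext a b
  rcases lt_trichotomy (pvSig a).1 (pvSig b).1 with h | h | h
  · simp [pvBf, pvM, Prod.Lex.lt_iff, h, asymm h]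
  · simp [pvBf, pvM, Prod.Lex.lt_iff, h]
  · simp [pvBf, pvM, Prod.Lex.lt_iff, h, asymm h, ne_of_gt h]

lemma pv_sorted2_eq (xs : List (List (String × String))) :
    PySem.List.sorted2 xs (fun s => (pvSig s).1) (fun s => (pvSig s).2) = PySem.List.sorted xs pvM := by
  rw [PySem.List.sorted_eq_foldl_insertBy]
  show xs.foldl (fun acc x => PySem.List.insertBy
      (fun a b => decide ((pvSig a).1 < (pvSig b).1) || (!decide ((pvSig b).1 < (pvSig a).1) && decide ((pvSig a).2 < (pvSig b).2))) x acc) [] =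
    xs.foldl (fun acc x => PySem.List.insertBy (fun a b => decide (pvM a < pvM b)) x acc) []
  rw [pv_before_eq]
  rfl

lemma pv_sorted_snoc (l : List (List (String × String))) (x : List (String × String)) :
    PySem.List.sorted (l ++ [x]) pvM = PySem.List.insertBy pvBf x (PySem.List.sorted l pvM) := by
  rw [PySem.List.sorted_eq_foldl_insertBy, PySem.List.sorted_eq_foldl_insertBy, List.foldl_append]
  rfl

-- inserting an element whose signature already occurs in a sorted list does not change the dedup
lemma pv_dedup_insert_dup (L : List (List (String × String))) (x : List (String × String))
    (hs : L.Pairwise (fun a b => pvM a ≤ pvM b)) (hmem : ∃ y ∈ L, pvSig y = pvSig x) :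
    ∀ prev, pvDedupAdj prev (PySem.List.insertBy pvBf x L) = pvDedupAdj prev L := by
  induction L with
  | nil => rcases hmem with ⟨y, hy, _⟩; cases hy
  | cons y t ih =>
    intro prev
    rw [List.pairwise_cons] at hs
    by_cases hxy : pvBf x y = true
    · exfalso
      rcases hmem with ⟨z, hz, hzx⟩
      have hx : pvM x < pvM y := of_decide_eq_true hxy
      rcases List.mem_cons.mp hz with rfl | hz'
      · exact absurd hx (by simp [pvM, hzx])
      · have h1 : pvM z = pvM x := by simp [pvM, hzx]
        have h2 : pvM y ≤ pvM z := hs.1 z hz'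
        rw [h1] at h2
        exact absurd hx (not_lt.mpr h2)
    · have hins : PySem.List.insertBy pvBf x (y :: t) = y :: PySem.List.insertBy pvBf x t := by
        simp [PySem.List.insertBy, hxy]
      by_cases hmt : ∃ z ∈ t, pvSig z = pvSig x
      · rw [hins]
        by_cases hp : some (pvSig y) = prev
        · simp only [pvDedupAdj, if_pos hp]
          exact ih hs.2 hmt prev
        · simp only [pvDedupAdj, if_neg hp]
          exact congrArg _ (ih hs.2 hmt _)
      · have hxy_eq : pvSig y = pvSig x := by
          rcases hmem with ⟨z, hz, hzx⟩
          rcases List.mem_cons.mp hz with rfl | hz'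
          · exact hzx
          · exact absurd ⟨z, hz', hzx⟩ hmt
        have hins2 : PySem.List.insertBy pvBf x t = x :: t := by
          cases t with
          | nil => rfl
          | cons z t' =>
            have h1 : pvM y ≤ pvM z := hs.1 z List.mem_cons_self
            have h2 : pvM x = pvM y := by simp [pvM, hxy_eq]
            have h3 : pvM x ≠ pvM z := by
              intro h
              exact hmt ⟨z, List.mem_cons_self, toLex.injective h.symm⟩
            have : pvBf x z = true := decide_eq_true (lt_of_le_of_ne (h2 ▸ h1) h3)
            simp [PySem.List.insertBy, this]
        rw [hins, hins2]
        by_cases hp : some (pvSig y) = prev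
        · have hp' : some (pvSig x) = prev := hxy_eq ▸ hp
          simp [pvDedupAdj, hp, hp']
        · have hp' : ¬ some (pvSig x) = prev := hxy_eq ▸ hp
          simp [pvDedupAdj, hp', hxy_eq]

-- inserting an element with a fresh signature commutes with the dedup pass
lemma pv_dedup_insert_fresh' (x : List (String × String)) (L : List (List (String × String)))
    (hs : L.Pairwise (fun a b => pvM a ≤ pvM b)) (hmem : ∀ y ∈ L, pvSig y ≠ pvSig x) :
    ∀ prev, (∀ p, prev = some p → toLex p ≤ pvM x ∧ p ≠ pvSig x) →
      pvDedupAdj prev (PySem.List.insertBy pvBf x L) = PySem.List.insertBy pvBf x (pvDedupAdj prev L) := by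
  induction L with
  | nil =>
    intro prev hprev
    have : ¬ some (pvSig x) = prev := by
      intro h
      exact (hprev _ h.symm).2 rfl
    simp [PySem.List.insertBy, pvDedupAdj, this]
  | cons y t ih =>
    intro prev hprev
    rw [List.pairwise_cons] at hs
    have hyx : pvSig y ≠ pvSig x := hmem y List.mem_cons_self
    by_cases hxy : pvBf x y = true
    · have hins : PySem.List.insertBy pvBf x (y :: t) = x :: y :: t := by
        simp [PySem.List.insertBy, hxy]
      have hpx : ¬ some (pvSig x) = prev := by
        intro h
        exact (hprev _ h.symm).2 rfl
      have hpy : ¬ some (pvSig y) = prev := by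
        intro h
        have h1 := (hprev _ h.symm).1
        have h2 : pvM x < pvM y := of_decide_eq_true hxy
        exact absurd (lt_of_le_of_lt h1 h2) (lt_irrefl _)
      have hyx' : ¬ some (pvSig y) = some (pvSig x) := by simp [hyx]
      rw [hins]
      simp only [pvDedupAdj, if_neg hpx, if_neg hpy, if_neg hyx']
      simp [PySem.List.insertBy, hxy]
    · have hins : PySem.List.insertBy pvBf x (y :: t) = y :: PySem.List.insertBy pvBf x t := by
        simp [PySem.List.insertBy, hxy]
      have hyle : pvM y ≤ pvM x := not_lt.mp (fun h => hxy (decide_eq_true h))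
      rw [hins]
      by_cases hp : some (pvSig y) = prev
      · simp only [pvDedupAdj, if_pos hp]
        exact ih hs.2 (fun z hz => hmem z (List.mem_cons_of_mem _ hz)) prev hprev
      · simp only [pvDedupAdj, if_neg hp]
        rw [ih hs.2 (fun z hz => hmem z (List.mem_cons_of_mem _ hz)) (some (pvSig y))
            (by intro p hpeq; cases Option.some.inj hpeq; exact ⟨hyle, hyx⟩)]
        simp [PySem.List.insertBy, hxy]

-- A's dedup loop, written structurally (state: the seen set)
def pvDfA (seen : PySem.Set (String × String)) : List (List (String × String)) → List (List (String × String))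
  | [] => []
  | s :: t =>
      if PySem.Set.contains seen (pvSig s) then pvDfA seen t
      else s :: pvDfA (PySem.Set.add seen (pvSig s)) t

lemma pv_fold_fst (l : List (List (String × String))) :
    ∀ acc seen, (l.foldl (fun st system =>
        if PySem.Set.contains st.2 (pvSig system) then st
        else (st.1 ++ [system], PySem.Set.add st.2 (pvSig system))) (acc, seen)).1
      = acc ++ pvDfA seen l := by
  induction l with
  | nil => intro acc seen; simp [pvDfA]
  | cons s t ih =>
    intro acc seen
    rw [List.foldl_cons]
    simp only [pvDfA]
    split_ifs with h
    · exact ih acc seen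
    · rw [ih]
      simp

lemma pv_dfA_snoc (l : List (List (String × String))) :
    ∀ (seen : PySem.Set (String × String)) (x : List (String × String)),
      pvDfA seen (l ++ [x]) =
        if (PySem.Set.contains seen (pvSig x) = true ∨ ∃ y ∈ l, pvSig y = pvSig x)
        then pvDfA seen l else pvDfA seen l ++ [x] := by
  induction l with
  | nil =>
    intro seen x
    by_cases h : PySem.Set.contains seen (pvSig x) = true
    · simp [pvDfA]
    · simp only [List.nil_append, pvDfA, if_neg h]
      rw [if_neg]
      rintro (h1 | ⟨y, hy, _⟩)
      · exact h h1
      · cases hy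
  | cons s t ih =>
    intro seen x
    by_cases h : PySem.Set.contains seen (pvSig s) = true
    · simp only [List.cons_append, pvDfA, if_pos h, ih]
      by_cases hsx : pvSig s = pvSig x
      · have hx : PySem.Set.contains seen (pvSig x) = true := hsx ▸ h
        rw [if_pos (Or.inl hx), if_pos (Or.inl hx)]
      · have : (PySem.Set.contains seen (pvSig x) = true ∨ ∃ y ∈ t, pvSig y = pvSig x)
             ↔ (PySem.Set.contains seen (pvSig x) = true ∨ ∃ y ∈ s :: t, pvSig y = pvSig x) := by
          constructor
          · rintro (h' | ⟨y, hy, hyx⟩)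
            · exact Or.inl h'
            · exact Or.inr ⟨y, List.mem_cons_of_mem _ hy, hyx⟩
          · rintro (h' | ⟨y, hy, hyx⟩)
            · exact Or.inl h'
            · rcases List.mem_cons.mp hy with rfl | hy'
              · exact absurd hyx hsx
              · exact Or.inr ⟨y, hy', hyx⟩
        rw [if_congr this rfl rfl]
    · simp only [List.cons_append, pvDfA, if_neg h, ih]
      have hcadd : (PySem.Set.contains (PySem.Set.add seen (pvSig s)) (pvSig x) = true)
          ↔ (PySem.Set.contains seen (pvSig x) = true ∨ pvSig s = pvSig x) := by
        rw [PySem.Set.contains_iff, PySem.Set.mem_add, PySem.Set.contains_iff]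
        constructor
        · rintro (h1 | h1)
          · exact Or.inl h1
          · exact Or.inr h1.symm
        · rintro (h1 | h1)
          · exact Or.inl h1
          · exact Or.inr h1.symm
      have heq : (PySem.Set.contains (PySem.Set.add seen (pvSig s)) (pvSig x) = true ∨ ∃ y ∈ t, pvSig y = pvSig x)
          ↔ (PySem.Set.contains seen (pvSig x) = true ∨ ∃ y ∈ s :: t, pvSig y = pvSig x) := by
        rw [hcadd]
        constructor
        · rintro ((h' | h') | ⟨y, hy, hyx⟩)
          · exact Or.inl h'
          · exact Or.inr ⟨s, List.mem_cons_self, h'⟩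
          · exact Or.inr ⟨y, List.mem_cons_of_mem _ hy, hyx⟩
        · rintro (h' | ⟨y, hy, hyx⟩)
          · exact Or.inl (Or.inl h')
          · rcases List.mem_cons.mp hy with rfl | hy'
            · exact Or.inl (Or.inr hyx)
            · exact Or.inr ⟨y, hy', hyx⟩
      rw [if_congr heq rfl rfl]
      by_cases hc : (PySem.Set.contains seen (pvSig x) = true ∨ ∃ y ∈ s :: t, pvSig y = pvSig x)
      · rw [if_pos hc, if_pos hc]
      · rw [if_neg hc, if_neg hc]

lemma pv_contains_empty (x : String × String) :
    PySem.Set.contains (PySem.Set.empty : PySem.Set (String × String)) x = false := rfl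

-- the heart: adjacent-dedup after a stable sort = sort after first-occurrence dedup
lemma pv_main (l : List (List (String × String))) :
    pvDedupAdj none (PySem.List.sorted l pvM) = PySem.List.sorted (pvDfA PySem.Set.empty l) pvM := by
  induction l using List.reverseRecOn with
  | nil => rfl
  | append_singleton l x ih =>
    rw [pv_sorted_snoc, pv_dfA_snoc]
    have hsorted := PySem.List.sorted_pairwise l pvM
    by_cases hm : ∃ y ∈ l, pvSig y = pvSig x
    · rw [if_pos (Or.inr hm)]
      have hmem : ∃ y ∈ PySem.List.sorted l pvM, pvSig y = pvSig x := by
        rcases hm with ⟨y, hy, hyx⟩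
        exact ⟨y, (PySem.List.mem_sorted l pvM false y).mpr hy, hyx⟩
      rw [pv_dedup_insert_dup _ _ hsorted hmem, ih]
    · have hnc : ¬ (PySem.Set.contains PySem.Set.empty (pvSig x) = true ∨ ∃ y ∈ l, pvSig y = pvSig x) := by
        rintro (h | h)
        · rw [pv_contains_empty] at h; cases h
        · exact hm h
      rw [if_neg hnc]
      have hmem : ∀ y ∈ PySem.List.sorted l pvM, pvSig y ≠ pvSig x := by
        intro y hy hyx
        exact hm ⟨y, (PySem.List.mem_sorted l pvM false y).mp hy, hyx⟩
      rw [pv_dedup_insert_fresh' x _ hsorted hmem none (by intro p h; cases h), ih, ← pv_sorted_snoc]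

-- a nested for-loop over tasks/items is the fold over the flattened item list
lemma pv_fold_flat {α β γ : Type} (items : β → List α) (g : γ → α → γ) (l : List β) :
    ∀ init, l.foldl (fun st b => (items b).foldl g st) init = (l.flatMap items).foldl g init := by
  induction l with
  | nil => intro init; rfl
  | cons b t ih => intro init; simp only [List.foldl_cons, List.flatMap_cons, List.foldl_append, ih]

-- ===== VERDICT (by name: the statement is the Claim_ definition above) =====
theorem collect_project_systems_py_spec : Claim_equal_collect_project_systems_py := by
  intro tasks _ _
  unfold Spec_collect_project_systems_py
  simp only [collect_project_systems_py, collect_project_systems_py_alt]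
  rw [pv_sorted2_eq, pv_sorted2_eq,
    pv_fold_flat (fun task => (PySem.Dict.mk task).getD "systems" []) _ tasks,
    pv_fold_fst, List.nil_append, pv_main]
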